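-- pv_equiv track=rewrite | github.com/TanviPatel9722/PuzzleForge | backend/skyscrapers.py | _filter_rows_by_clues
-- ===== SOURCE A (Python) =====
-- from typing import List, Tuple, Optional, Dict, Iterable
--
-- def visible_count(seq: List[int]) -> int:
--     """Count visible skyscrapers scanning from left to right."""
--     m = 0
--     c = 0
--     for x in seq:
--         if x > m:
--             m = x
--             c += 1
--     return c
--
-- def _filter_rows_by_clues(perms: List[Tuple[int, ...]], left: int, right: int) -> List[Tuple[int, ...]]:
--     out = []
--     for p in perms:
--         if left and visible_count(list(p)) != left:
--             continue
--         if right and visible_count(list(reversed(p))) != right: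
--             continue
--         out.append(p)
--     return out
-- ===== SOURCE B (Python) =====
-- def _visible(seq):
--     # prefix-maxima table (base 0), then count positions strictly above
--     # the maximum of the preceding prefix
--     pref = [0]
--     for x in seq:
--         pref.append(max(pref[-1], x))
--     return sum(x > m for x, m in zip(seq, pref))
--
-- def _filter_rows_by_clues(perms, left, right):
--     return [p for p in perms
--             if (not left or _visible(list(p)) == left)
--             and (not right or _visible(list(reversed(p))) == right)]
-- ===== Notes on version B (the rewrite author's own statement) =====
-- stated objective: idiomatic
-- what changed: visible_count's single running-max/counter scan is replaced by building the prefix-maxima table first and summing a zip comparison, and the accumulator loop with continue-guards becomes a guarded list comprehension (filter).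
import Mathlib
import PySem

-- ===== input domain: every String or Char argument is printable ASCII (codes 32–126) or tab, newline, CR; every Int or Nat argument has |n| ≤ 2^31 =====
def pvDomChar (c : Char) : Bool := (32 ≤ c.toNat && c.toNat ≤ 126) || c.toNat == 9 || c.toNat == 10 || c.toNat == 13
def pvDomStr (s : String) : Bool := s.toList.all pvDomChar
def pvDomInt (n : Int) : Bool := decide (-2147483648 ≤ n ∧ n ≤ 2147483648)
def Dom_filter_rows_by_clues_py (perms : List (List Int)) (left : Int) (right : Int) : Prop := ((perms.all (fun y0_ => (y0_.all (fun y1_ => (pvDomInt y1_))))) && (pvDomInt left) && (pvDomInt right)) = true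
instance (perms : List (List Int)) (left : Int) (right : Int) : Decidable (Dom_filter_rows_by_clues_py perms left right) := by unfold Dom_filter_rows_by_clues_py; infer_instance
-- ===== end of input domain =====

-- B: visible_count rebuilt as a prefix-maxima table + zip/sum count, and the
-- accumulator loop with continue-guards becomes a filter (idiomatic; same cost).


-- ===== PORT A =====
-- 'm = 0; c = 0; for x in seq: if x > m: m = x; c += 1; return c'
def visible_count (seq : List Int) : Int :=
  (seq.foldl (fun (mc : Int × Int) x => if x > mc.1 then (x, mc.2 + 1) else mc) (0, 0)).2

def filter_rows_by_clues_py (perms : List (List Int)) (left : Int) (right : Int) : List (List Int) :=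
  perms.foldl (fun out p =>
    if left ≠ 0 ∧ visible_count p ≠ left then out
    else if right ≠ 0 ∧ visible_count p.reverse ≠ right then out
    else out ++ [p]) []

-- ===== PORT B =====
-- 'pref = [0]; for x in seq: pref.append(max(pref[-1], x))' — the recursion carries
-- pref[-1] as m and emits the table front to back (exact transcription of the append loop)
def prefMax (m : Int) : List Int → List Int
  | [] => [m]
  | x :: xs => m :: prefMax (max m x) xs

-- 'sum(x > m for x, m in zip(seq, pref))'
def visibleAlt (seq : List Int) : Int :=
  ((seq.zip (prefMax 0 seq)).map (fun p => if p.1 > p.2 then (1 : Int) else 0)).sum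

def filter_rows_by_clues_py_alt (perms : List (List Int)) (left : Int) (right : Int) : List (List Int) :=
  perms.filter (fun p =>
    (left == 0 || visibleAlt p == left) && (right == 0 || visibleAlt p.reverse == right))

-- ===== PRECONDITION & SPEC =====
def Spec_filter_rows_by_clues_py (perms : List (List Int)) (left : Int) (right : Int) (out : List (List Int)) : Prop := out = filter_rows_by_clues_py_alt perms left right
instance (perms : List (List Int)) (left : Int) (right : Int) (out : List (List Int)) : Decidable (Spec_filter_rows_by_clues_py perms left right out) := by unfold Spec_filter_rows_by_clues_py; infer_instance

-- ===== CLAIM (what is proved, stated in full; the proofs are below) =====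
def Claim_equal_filter_rows_by_clues_py : Prop := ∀ (perms : List (List Int)) (left : Int) (right : Int), Dom_filter_rows_by_clues_py perms left right → Spec_filter_rows_by_clues_py perms left right (filter_rows_by_clues_py perms left right)

-- ===== LEMMAS AND PROOFS =====

theorem vis_loop_eq (seq : List Int) : ∀ (m c : Int),
    (seq.foldl (fun (mc : Int × Int) x => if x > mc.1 then (x, mc.2 + 1) else mc) (m, c)).2
      = c + ((seq.zip (prefMax m seq)).map (fun p => if p.1 > p.2 then (1 : Int) else 0)).sum := by
  induction seq with
  | nil => intro m c; simp [prefMax]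
  | cons x xs ih =>
    intro m c
    by_cases h : x > m
    · have hm : max m x = x := by omega
      simp [prefMax, h, hm, ih]
      ring
    · have hm : max m x = m := by omega
      simp [prefMax, h, hm, ih]

theorem vis_eq (seq : List Int) : visible_count seq = visibleAlt seq := by
  simp [visible_count, visibleAlt, vis_loop_eq]

theorem filt_loop_eq (left right : Int) (perms : List (List Int)) : ∀ (acc : List (List Int)),
    perms.foldl (fun out p =>
      if left ≠ 0 ∧ visible_count p ≠ left then out
      else if right ≠ 0 ∧ visible_count p.reverse ≠ right then out
      else out ++ [p]) acc
    = acc ++ perms.filter (fun p =>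
        (left == 0 || visible_count p == left) && (right == 0 || visible_count p.reverse == right)) := by
  induction perms with
  | nil => intro acc; simp
  | cons p ps ih =>
    intro acc
    rw [List.foldl_cons, List.filter_cons]
    by_cases h1 : left ≠ 0 ∧ visible_count p ≠ left
    · have hb : ((left == 0 || visible_count p == left) &&
          (right == 0 || visible_count p.reverse == right)) = false := by
        simp only [Bool.and_eq_false_iff, Bool.or_eq_false_iff, beq_eq_false_iff_ne]
        exact Or.inl ⟨h1.1, h1.2⟩
      rw [if_pos h1, ih, hb]
      simp
    · by_cases h2 : right ≠ 0 ∧ visible_count p.reverse ≠ right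
      · have hb : ((left == 0 || visible_count p == left) &&
            (right == 0 || visible_count p.reverse == right)) = false := by
          simp only [Bool.and_eq_false_iff, Bool.or_eq_false_iff, beq_eq_false_iff_ne]
          exact Or.inr ⟨h2.1, h2.2⟩
        rw [if_neg h1, if_pos h2, ih, hb]
        simp
      · have hb : ((left == 0 || visible_count p == left) &&
            (right == 0 || visible_count p.reverse == right)) = true := by
          rw [not_and_or, not_not, not_not] at h1 h2
          simp only [Bool.and_eq_true, Bool.or_eq_true, beq_iff_eq]
          exact ⟨h1, h2⟩
        rw [if_neg h1, if_neg h2, ih, hb]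
        simp

-- ===== VERDICT (by name: the statement is the Claim_ definition above) =====
theorem filter_rows_by_clues_py_spec : Claim_equal_filter_rows_by_clues_py := by
  intro perms left right _
  unfold Spec_filter_rows_by_clues_py filter_rows_by_clues_py filter_rows_by_clues_py_alt
  rw [filt_loop_eq]
  simp [vis_eq]
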